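-- pv_equiv track=rewrite | github.com/BerBai/codedb | HW/【DFS-BFS】2024E-可以组成网络的服务器.py | find
-- ===== SOURCE A (Python) =====
-- from collections import deque
--
-- def find(n, m, arr):
--     queue = deque()
--     vis = [[False] * m for _ in range(n)]
--     max_m = 0
--     for i in range(n):
--         for j in range(m):
--             if arr[i][j]:
--                 queue.append([i, j])
--                 vis[i][j] = True
--                 mm = bfs(queue, n, m, arr, vis)
--                 max_m = max(max_m, mm)
--     return max_m
--
-- def bfs(queue, n, m, arr, vis):
--     directions = [(-1, 0), (1, 0), (0, -1), (0, 1)]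
--     ma = 1
--     while queue:
--         i, j = queue.popleft()
--         for x, y in directions:
--             ni, nj = i + x, j + y
--             if 0 <= ni < n and 0 <= nj < m and not vis[ni][nj] and arr[ni][nj]:
--                 vis[ni][nj] = True
--                 ma += 1
--                 queue.append([ni, nj])
--     return ma
-- ===== SOURCE B (Python) =====
-- def find(n, m, arr):
--     # Union-find (disjoint-set, union by smaller root index) over cells encoded i*m+j:
--     # one pass unions each server cell with its right and down server neighbours,
--     # then component sizes are counted per root; no BFS queue or visited matrix.
--     if n <= 0 or m <= 0:
--         return 0
--     parent = list(range(n * m))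
--
--     def root(x):
--         while parent[x] != x:
--             x = parent[x]
--         return x
--
--     def union(a, b):
--         ra, rb = root(a), root(b)
--         if ra != rb:
--             if ra < rb:
--                 ra, rb = rb, ra
--             parent[ra] = rb
--
--     for i in range(n):
--         for j in range(m):
--             if arr[i][j]:
--                 if j + 1 < m and arr[i][j + 1]:
--                     union(i * m + j, i * m + j + 1)
--                 if i + 1 < n and arr[i + 1][j]:
--                     union(i * m + j, (i + 1) * m + j)
--
--     counts = {}
--     for i in range(n):
--         for j in range(m):
--             if arr[i][j]:
--                 r = root(i * m + j)
--                 counts[r] = counts.get(r, 0) + 1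
--
--     best = 0
--     for i in range(n):
--         for j in range(m):
--             if arr[i][j]:
--                 best = max(best, counts[root(i * m + j)])
--     return best
-- ===== Notes on version B (the rewrite author's own statement) =====
-- stated objective: alternative
-- what changed: Replaces A's BFS flood fill with a deque and an n*m boolean visited matrix by a disjoint-set (union-find) over cells encoded i*m+j: one pass unions each server cell with its right and down server neighbours, then component sizes are tallied per root and the maximum is returned; no queue, no visited matrix.
import Mathlib
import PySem

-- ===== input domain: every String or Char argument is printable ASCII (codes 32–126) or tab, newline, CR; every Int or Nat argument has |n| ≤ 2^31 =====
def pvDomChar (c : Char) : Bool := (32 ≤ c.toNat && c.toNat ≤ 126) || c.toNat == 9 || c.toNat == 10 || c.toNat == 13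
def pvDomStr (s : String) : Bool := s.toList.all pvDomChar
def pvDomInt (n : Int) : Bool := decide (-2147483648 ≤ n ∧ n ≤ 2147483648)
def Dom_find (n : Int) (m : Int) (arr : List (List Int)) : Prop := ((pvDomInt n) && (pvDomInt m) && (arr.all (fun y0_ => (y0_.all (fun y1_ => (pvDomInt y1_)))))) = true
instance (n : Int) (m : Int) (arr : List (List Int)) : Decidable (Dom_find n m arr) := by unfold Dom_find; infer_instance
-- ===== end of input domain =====

-- B replaces A's BFS flood fill (deque + n×m boolean visited matrix) by a disjoint-set
-- (union-find, union by smaller root index) over cells encoded i*m+j, tallying component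
-- sizes per root (objective: alternative — different algorithmic machinery, similar cost).

-- ===== PORT A =====

-- arr[i][j] for the nonnegative in-range indices at which A reads it (exact there)
def aget (arr : List (List Int)) (i j : Int) : Int := (arr.getD i.toNat []).getD j.toNat 0

-- vis[i][j] read/write on the n×m boolean matrix (indices are nonnegative at every use)
def vget (vis : List (List Bool)) (i j : Int) : Bool := (vis.getD i.toNat []).getD j.toNat false

def vset (vis : List (List Bool)) (i j : Int) : List (List Bool) :=
  vis.set i.toNat ((vis.getD i.toNat []).set j.toNat true)

-- the (finite) index grid, used only in termination measures and proofs
def gridF (n m : Int) : Finset (Int × Int) :=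
  (Finset.range n.toNat ×ˢ Finset.range m.toNat).image (fun p => ((p.1 : Int), (p.2 : Int)))

-- the body of bfs's `for x, y in directions` loop: threads (vis, queue, ma).
-- The two final conjuncts of the guard are a totality guard (always true at the call
-- sites, where vis is an n×m matrix and the bounds checks have passed).
def bfsBody (n m : Int) (arr : List (List Int)) (i j : Int)
    (s : List (List Bool) × List (Int × Int) × Int) (d : Int × Int) :
    List (List Bool) × List (Int × Int) × Int :=
  let ni := i + d.1
  let nj := j + d.2
  if 0 ≤ ni ∧ ni < n ∧ 0 ≤ nj ∧ nj < m ∧ vget s.1 ni nj = false ∧ aget arr ni nj ≠ 0 ∧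
      ni.toNat < s.1.length ∧ nj.toNat < (s.1.getD ni.toNat []).length
  then (vset s.1 ni nj, s.2.1 ++ [(ni, nj)], s.2.2 + 1)
  else s

def bfsStep (n m : Int) (arr : List (List Int)) (i j : Int)
    (s : List (List Bool) × List (Int × Int) × Int) :
    List (List Bool) × List (Int × Int) × Int :=
  ([(-1, 0), (1, 0), (0, -1), (0, 1)] : List (Int × Int)).foldl (bfsBody n m arr i j) s

-- cells of the grid not yet marked in vis (termination measure of bfs)
def unvisN (n m : Int) (vis : List (List Bool)) : Nat :=
  ((gridF n m) \ ((gridF n m).filter fun c => vget vis c.1 c.2)).card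

theorem mem_gridF (n m : Int) (c : Int × Int) :
    c ∈ gridF n m ↔ 0 ≤ c.1 ∧ c.1 < n ∧ 0 ≤ c.2 ∧ c.2 < m := by
  simp only [gridF, Finset.mem_image, Finset.mem_product, Finset.mem_range, Prod.exists]
  constructor
  · rintro ⟨a, b, ⟨h1, h2⟩, rfl⟩; simp; omega
  · rintro ⟨h1, h2, h3, h4⟩
    exact ⟨c.1.toNat, c.2.toNat, ⟨by omega, by omega⟩, by simp [Prod.ext_iff]; omega⟩

theorem getD_set_self {α : Type} (l : List α) (k : Nat) (x d : α) (h : k < l.length) :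
    (l.set k x).getD k d = x := by
  rw [List.getD_eq_getElem?_getD, List.getElem?_set_self h, Option.getD_some]

theorem getD_set_ne {α : Type} (l : List α) (k k' : Nat) (x d : α) (h : k ≠ k') :
    (l.set k x).getD k' d = l.getD k' d := by
  rw [List.getD_eq_getElem?_getD, List.getElem?_set_ne h, ← List.getD_eq_getElem?_getD]

theorem vget_vset_eq (vis : List (List Bool)) (i j a b : Int)
    (hi : i.toNat < vis.length) (hj : j.toNat < (vis.getD i.toNat []).length) :
    vget (vset vis i j) a b =
      if a.toNat = i.toNat ∧ b.toNat = j.toNat then true else vget vis a b := by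
  unfold vget vset
  by_cases ha : a.toNat = i.toNat
  · rw [ha, getD_set_self _ _ _ _ hi]
    by_cases hb : b.toNat = j.toNat
    · rw [hb, getD_set_self _ _ _ _ hj]
      simp [ha, hb]
    · rw [getD_set_ne _ _ _ _ _ (fun hh => hb hh.symm)]
      simp [ha, hb]
  · rw [getD_set_ne _ _ _ _ _ (fun hh => ha hh.symm)]
    simp [ha]

theorem unvis_vset (n m : Int) (vis : List (List Bool)) (i j : Int)
    (hb : 0 ≤ i ∧ i < n ∧ 0 ≤ j ∧ j < m) (hv : vget vis i j = false)
    (hi : i.toNat < vis.length) (hj : j.toNat < (vis.getD i.toNat []).length) :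
    unvisN n m (vset vis i j) + 1 = unvisN n m vis := by
  unfold unvisN
  have hmem : (i, j) ∈ gridF n m := (mem_gridF n m (i, j)).2 (by exact hb)
  have hfil : ((gridF n m).filter fun c => vget (vset vis i j) c.1 c.2) =
      insert (i, j) ((gridF n m).filter fun c => vget vis c.1 c.2) := by
    ext c
    simp only [Finset.mem_filter, Finset.mem_insert]
    rw [vget_vset_eq vis i j c.1 c.2 hi hj]
    rcases c with ⟨a, b⟩
    by_cases hc : (a, b) = (i, j)
    · rcases Prod.mk.injEq .. ▸ hc with ⟨rfl, rfl⟩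
      simp [hmem]
    · have : ¬(a.toNat = i.toNat ∧ b.toNat = j.toNat) ∨ ¬((a,b) ∈ gridF n m) := by
        by_cases hg : (a, b) ∈ gridF n m
        · left
          rw [mem_gridF] at hg
          simp only [Prod.mk.injEq, not_and_or] at hc ⊢
          rcases hc with h | h
          · left; omega
          · right; omega
        · right; exact hg
      rcases this with h | h
      · simp only [h, if_false]
        simp [hc]
      · simp [h, hc]
  rw [hfil, Finset.sdiff_insert]
  rw [Finset.card_erase_of_mem (by simp [Finset.mem_sdiff, hmem, hv])]
  have hpos : 0 < ((gridF n m) \ ((gridF n m).filter fun c => vget vis c.1 c.2)).card :=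
    Finset.card_pos.2 ⟨(i, j), by simp [Finset.mem_sdiff, hmem, hv]⟩
  omega

theorem bfsFold_measure (n m : Int) (arr : List (List Int)) (i j : Int)
    (ds : List (Int × Int)) (s : List (List Bool) × List (Int × Int) × Int) :
    5 * unvisN n m (ds.foldl (bfsBody n m arr i j) s).1 +
      (ds.foldl (bfsBody n m arr i j) s).2.1.length
    ≤ 5 * unvisN n m s.1 + s.2.1.length := by
  induction ds generalizing s with
  | nil => simp
  | cons d ds ih =>
    refine le_trans (ih _) ?_
    show 5 * unvisN n m (bfsBody n m arr i j s d).1 +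
        (bfsBody n m arr i j s d).2.1.length ≤ _
    unfold bfsBody
    dsimp only
    split
    · next h =>
      obtain ⟨h1, h2, h3, h4, h5, h6, h7, h8⟩ := h
      have := unvis_vset n m s.1 (i + d.1) (j + d.2) ⟨h1, h2, h3, h4⟩ h5 h7 h8
      simp only [List.length_append, List.length_cons, List.length_nil]
      omega
    · exact le_refl _

-- A's bfs: `while queue: i, j = queue.popleft(); …`; vis is mutated in Python, so the
-- port returns (ma, vis)
def bfs (n m : Int) (arr : List (List Int)) (queue : List (Int × Int))
    (vis : List (List Bool)) (ma : Int) : Int × List (List Bool) :=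
  match queue with
  | [] => (ma, vis)
  | (i, j) :: rest =>
    let s := bfsStep n m arr i j (vis, rest, ma)
    bfs n m arr s.2.1 s.1 s.2.2
termination_by 5 * unvisN n m vis + queue.length
decreasing_by
  have := bfsFold_measure n m arr i j [(-1, 0), (1, 0), (0, -1), (0, 1)] (vis, rest, ma)
  simp only [List.length_cons]
  calc 5 * unvisN n m (bfsStep n m arr i j (vis, rest, ma)).1 +
        (bfsStep n m arr i j (vis, rest, ma)).2.1.length
      ≤ 5 * unvisN n m vis + rest.length := this
    _ < 5 * unvisN n m vis + (rest.length + 1) := by omega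

def find (n : Int) (m : Int) (arr : List (List Int)) : Int :=
  let vis0 := List.replicate n.toNat (List.replicate m.toNat false)
  ((PySem.List.pyRange 0 n 1).foldl (fun (s : List (List Bool) × Int) i =>
    (PySem.List.pyRange 0 m 1).foldl (fun (s : List (List Bool) × Int) j =>
      if aget arr i j ≠ 0 then
        let r := bfs n m arr [(i, j)] (vset s.1 i j) 1
        (r.2, max s.2 r.1)
      else s) s) (vis0, 0)).2

-- ===== PORT B =====

-- parent[x] read with default x (totality; every actual read is in range)
def pread (p : List Int) (x : Int) : Int := p.getD x.toNat x

-- B's `root`: `while parent[x] != x: x = parent[x]`.  Every parent list B builds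
-- satisfies 0 ≤ parent[x] ≤ x, so `parent[x] != x` is exactly the recursion guard
-- `0 ≤ parent[x] ∧ parent[x] < x` (a totality guard making the loop well-founded).
def rootF (p : List Int) (x : Int) : Int :=
  if h : 0 ≤ pread p x ∧ pread p x < x then rootF p (pread p x) else x
termination_by x.toNat
decreasing_by omega

-- B's `union`: link the larger root under the smaller one
def unionF (p : List Int) (a b : Int) : List Int :=
  let ra := rootF p a
  let rb := rootF p b
  if ra ≠ rb then
    if ra < rb then p.set rb.toNat ra else p.set ra.toNat rb
  else p

def find_alt (n : Int) (m : Int) (arr : List (List Int)) : Int :=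
  -- if n <= 0 or m <= 0: return 0
  if n ≤ 0 ∨ m ≤ 0 then 0 else
  -- parent = list(range(n * m))
  let parent0 : List Int := (List.range (n * m).toNat).map (fun k : Nat => (k : Int))
  -- first pass: union each server cell with its right and down server neighbours
  let parent := (PySem.List.pyRange 0 n 1).foldl (fun (p : List Int) i =>
    (PySem.List.pyRange 0 m 1).foldl (fun (p : List Int) j =>
      if aget arr i j ≠ 0 then
        let p1 := if j + 1 < m ∧ aget arr i (j + 1) ≠ 0 then
            unionF p (i * m + j) (i * m + j + 1) else p
        if i + 1 < n ∧ aget arr (i + 1) j ≠ 0 then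
            unionF p1 (i * m + j) ((i + 1) * m + j) else p1
      else p) p) parent0
  -- second pass: counts[r] = counts.get(r, 0) + 1 at the root of every server cell
  let counts := (PySem.List.pyRange 0 n 1).foldl (fun (cn : PySem.Dict Int Int) i =>
    (PySem.List.pyRange 0 m 1).foldl (fun (cn : PySem.Dict Int Int) j =>
      if aget arr i j ≠ 0 then
        let r := rootF parent (i * m + j)
        cn.insert r (cn.getD r 0 + 1)
      else cn) cn) PySem.Dict.empty
  -- third pass: best = max(best, counts[root(i*m+j)])
  (PySem.List.pyRange 0 n 1).foldl (fun (b : Int) i =>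
    (PySem.List.pyRange 0 m 1).foldl (fun (b : Int) j =>
      if aget arr i j ≠ 0 then max b (counts.getD (rootF parent (i * m + j)) 0) else b) b) 0

-- ===== PRECONDITION & SPEC =====
-- Pre_find excludes exactly the inputs on which Python A raises IndexError: when
-- 0 < m (so arr[i][j] is evaluated), arr must have at least n rows and each of the
-- first n rows at least m entries.
def Pre_find (n : Int) (m : Int) (arr : List (List Int)) : Prop :=
  0 < m → (n ≤ (arr.length : Int) ∧ ∀ r ∈ arr.take n.toNat, m ≤ (r.length : Int))
instance (n : Int) (m : Int) (arr : List (List Int)) : Decidable (Pre_find n m arr) := by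
  unfold Pre_find; infer_instance

def pvWitness_find : Int × Int × List (List Int) := (2, 2, [[1, 0], [1, 1]])

def Spec_find (n : Int) (m : Int) (arr : List (List Int)) (out : Int) : Prop := out = find_alt n m arr
instance (n : Int) (m : Int) (arr : List (List Int)) (out : Int) : Decidable (Spec_find n m arr out) := by unfold Spec_find; infer_instance

-- ===== CLAIM (what is proved, stated in full; the proofs are below) =====
def Claim_equal_find : Prop := ∀ (n : Int) (m : Int) (arr : List (List Int)), Dom_find n m arr → Pre_find n m arr → Spec_find n m arr (find n m arr)

-- ===== LEMMAS AND PROOFS =====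

-- a cell is "good" iff it is a server cell of the grid
def Good (n m : Int) (arr : List (List Int)) (c : Int × Int) : Prop :=
  0 ≤ c.1 ∧ c.1 < n ∧ 0 ≤ c.2 ∧ c.2 < m ∧ aget arr c.1 c.2 ≠ 0

def Adj (n m : Int) (arr : List (List Int)) (c d : Int × Int) : Prop :=
  Good n m arr c ∧ Good n m arr d ∧ (c.1 - d.1).natAbs + (c.2 - d.2).natAbs = 1

def Reach (n m : Int) (arr : List (List Int)) : Int × Int → Int × Int → Prop :=
  Relation.ReflTransGen (Adj n m arr)

def RSet (n m : Int) (arr : List (List Int)) (q : List (Int × Int)) : Set (Int × Int) :=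
  {d | ∃ c ∈ q, Reach n m arr c d}

def VSet (vis : List (List Bool)) : Set (Int × Int) :=
  {c | 0 ≤ c.1 ∧ 0 ≤ c.2 ∧ vget vis c.1 c.2 = true}

def LSet (seen : List (Int × Int)) : Set (Int × Int) := {c | c ∈ seen}

def Shape (n m : Int) (vis : List (List Bool)) : Prop :=
  vis.length = n.toNat ∧ ∀ r ∈ vis, r.length = m.toNat

def Closed (n m : Int) (arr : List (List Int)) (V : Set (Int × Int)) : Prop :=
  ∀ c ∈ V, ∀ d, Adj n m arr c d → d ∈ V

theorem adj_symm (n m : Int) (arr : List (List Int)) : Symmetric (Adj n m arr) := by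
  rintro c d ⟨hc, hd, habs⟩
  exact ⟨hd, hc, by omega⟩

theorem reach_symm (n m : Int) (arr : List (List Int)) {c d : Int × Int}
    (h : Reach n m arr c d) : Reach n m arr d c :=
  Relation.ReflTransGen.symmetric (adj_symm n m arr) h

theorem good_finite (n m : Int) (arr : List (List Int)) :
    {c | Good n m arr c}.Finite := by
  apply Set.Finite.subset (gridF n m).finite_toSet
  intro c hc
  simp only [Finset.coe_image, Set.mem_setOf_eq] at *
  exact_mod_cast (mem_gridF n m c).2 ⟨hc.1, hc.2.1, hc.2.2.1, hc.2.2.2.1⟩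

theorem reach_mem_closed (n m : Int) (arr : List (List Int)) {V : Set (Int × Int)}
    (hV : Closed n m arr V) {c d : Int × Int} (hc : c ∈ V) (h : Reach n m arr c d) :
    d ∈ V := by
  induction h with
  | refl => exact hc
  | tail _ hbd ih => exact hV _ ih _ hbd

theorem reach_good (n m : Int) (arr : List (List Int)) {c d : Int × Int}
    (h : Reach n m arr c d) (hc : Good n m arr c) : Good n m arr d := by
  induction h with
  | refl => exact hc
  | tail _ hbd _ => exact hbd.2.1

theorem RSet_nil (n m : Int) (arr : List (List Int)) : RSet n m arr [] = ∅ := by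
  simp [RSet]

theorem rset_sub_good (n m : Int) (arr : List (List Int)) (q : List (Int × Int))
    (hq : ∀ c ∈ q, Good n m arr c) : RSet n m arr q ⊆ {c | Good n m arr c} := by
  rintro d ⟨c, hc, hr⟩
  exact reach_good n m arr hr (hq c hc)

theorem union_RSet_closed (n m : Int) (arr : List (List Int)) (q : List (Int × Int))
    (V : Set (Int × Int)) (hq : ∀ c ∈ q, c ∈ V)
    (hcl : ∀ c ∈ V, c ∉ q → ∀ d, Adj n m arr c d → d ∈ V) :
    Closed n m arr (V ∪ RSet n m arr q) := by
  rintro x (hx | hx) d hadj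
  · by_cases hxq : x ∈ q
    · exact Or.inr ⟨x, hxq, Relation.ReflTransGen.single hadj⟩
    · exact Or.inl (hcl x hx hxq d hadj)
  · obtain ⟨c, hc, hr⟩ := hx
    exact Or.inr ⟨c, hc, Relation.ReflTransGen.tail hr hadj⟩

theorem ncard_LSet_of_nodup (l : List (Int × Int)) (h : l.Nodup) :
    (LSet l).ncard = l.length := by
  have : LSet l = ↑l.toFinset := by ext x; simp [LSet]
  rw [this, Set.ncard_coe_finset, List.toFinset_card_of_nodup h]

theorem LSet_finite (l : List (Int × Int)) : (LSet l).Finite := by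
  have : LSet l = ↑l.toFinset := by ext x; simp [LSet]
  rw [this]; exact (l.toFinset).finite_toSet

theorem shape_guard (n m : Int) (vis : List (List Bool)) (hsh : Shape n m vis)
    {a b : Int} (h : 0 ≤ a ∧ a < n ∧ 0 ≤ b ∧ b < m) :
    a.toNat < vis.length ∧ b.toNat < (vis.getD a.toNat []).length := by
  have h1 : a.toNat < vis.length := by rw [hsh.1]; omega
  refine ⟨h1, ?_⟩
  rw [List.getD_eq_getElem vis [] h1, hsh.2 _ (List.getElem_mem h1)]
  omega

theorem shape_vset (n m : Int) (vis : List (List Bool)) (i j : Int)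
    (hsh : Shape n m vis) (hi : i.toNat < vis.length) : Shape n m (vset vis i j) := by
  refine ⟨by simp [vset, hsh.1], ?_⟩
  intro r hr
  rcases List.mem_or_eq_of_mem_set hr with hr | rfl
  · exact hsh.2 r hr
  · rw [List.length_set, List.getD_eq_getElem vis [] hi]
    exact hsh.2 _ (List.getElem_mem hi)

theorem not_mem_VSet_iff (vis : List (List Bool)) {a b : Int} (ha : 0 ≤ a) (hb : 0 ≤ b) :
    (a, b) ∉ VSet vis ↔ vget vis a b = false := by
  simp [VSet, ha, hb]

theorem VSet_vset (n m : Int) (vis : List (List Bool)) (i j : Int)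
    (hsh : Shape n m vis) (hb : 0 ≤ i ∧ i < n ∧ 0 ≤ j ∧ j < m) :
    VSet (vset vis i j) = insert (i, j) (VSet vis) := by
  obtain ⟨h1, h2⟩ := shape_guard n m vis hsh hb
  ext ⟨x, y⟩
  simp only [VSet, Set.mem_insert_iff, Set.mem_setOf_eq, Prod.mk.injEq]
  rw [vget_vset_eq vis i j x y h1 h2]
  by_cases hxy : x.toNat = i.toNat ∧ y.toNat = j.toNat
  · simp only [hxy, if_true]
    constructor
    · rintro ⟨hx, hy, -⟩; left; constructor <;> omega
    · rintro (⟨rfl, rfl⟩ | ⟨hx, hy, -⟩) <;> refine ⟨by omega, by omega, rfl⟩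
  · simp only [hxy, if_false]
    constructor
    · rintro ⟨hx, hy, hv⟩; exact Or.inr ⟨hx, hy, hv⟩
    · rintro (⟨rfl, rfl⟩ | ⟨hx, hy, hv⟩)
      · exact absurd ⟨rfl, rfl⟩ hxy
      · exact ⟨hx, hy, hv⟩

theorem bfsFold_spec (n m : Int) (arr : List (List Int)) (i j : Int)
    (ds : List (Int × Int)) :
    ∀ (vis : List (List Bool)) (q0 : List (Int × Int)) (ma : Int), Shape n m vis →
    ∃ (vis' : List (List Bool)) (news : List (Int × Int)),
      ds.foldl (bfsBody n m arr i j) (vis, q0, ma) =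
        (vis', q0 ++ news, ma + (news.length : Int)) ∧
      Shape n m vis' ∧
      VSet vis' = VSet vis ∪ LSet news ∧
      news.Nodup ∧
      (∀ c ∈ news, c ∈ ds.map (fun d => (i + d.1, j + d.2)) ∧ Good n m arr c ∧ c ∉ VSet vis) ∧
      (∀ d ∈ ds, Good n m arr (i + d.1, j + d.2) → (i + d.1, j + d.2) ∈ VSet vis') := by
  induction ds with
  | nil =>
    intro vis q0 ma hsh
    exact ⟨vis, [], by simp, hsh, by simp [LSet], by simp, by simp, by simp⟩
  | cons d ds ih =>
    intro vis q0 ma hsh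
    rw [List.foldl_cons]
    show ∃ vis' news, ds.foldl (bfsBody n m arr i j) (bfsBody n m arr i j (vis, q0, ma) d) = _ ∧ _
    unfold bfsBody
    dsimp only
    split
    · next hacc =>
      obtain ⟨h1, h2, h3, h4, h5, h6, h7, h8⟩ := hacc
      have hgood : Good n m arr (i + d.1, j + d.2) := ⟨h1, h2, h3, h4, h6⟩
      have hnotV : (i + d.1, j + d.2) ∉ VSet vis := (not_mem_VSet_iff vis h1 h3).2 h5
      have hsh1 : Shape n m (vset vis (i + d.1) (j + d.2)) := shape_vset n m vis _ _ hsh h7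
      have hV1 : VSet (vset vis (i + d.1) (j + d.2)) = insert (i + d.1, j + d.2) (VSet vis) :=
        VSet_vset n m vis _ _ hsh ⟨h1, h2, h3, h4⟩
      obtain ⟨vis', news', heq, hsh', hV', hnd', hmem', hcomp'⟩ :=
        ih (vset vis (i + d.1) (j + d.2)) (q0 ++ [(i + d.1, j + d.2)]) (ma + 1) hsh1
      refine ⟨vis', (i + d.1, j + d.2) :: news', ?_, hsh', ?_, ?_, ?_, ?_⟩
      · refine heq.trans ?_
        simp only [Prod.mk.injEq, List.append_assoc, List.singleton_append, List.length_cons,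
          true_and]
        push_cast
        ring
      · rw [hV', hV1]
        ext x
        simp only [Set.mem_union, Set.mem_insert_iff, LSet, Set.mem_setOf_eq, List.mem_cons]
        tauto
      · refine List.nodup_cons.2 ⟨?_, hnd'⟩
        intro hmem
        have := (hmem' _ hmem).2.2
        rw [hV1] at this
        exact this (Set.mem_insert _ _)
      · intro c hcmem
        rcases List.mem_cons.mp hcmem with rfl | hc
        · exact ⟨by simp, hgood, hnotV⟩
        · obtain ⟨hds, hg, hnv⟩ := hmem' c hc
          refine ⟨by simp only [List.map_cons, List.mem_cons]; exact Or.inr hds, hg, ?_⟩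
          rw [hV1] at hnv
          exact fun hcv => hnv (Set.mem_insert_of_mem _ hcv)
      · intro d0 hd0mem hg
        rcases List.mem_cons.mp hd0mem with rfl | hd0
        · rw [hV']
          left
          rw [hV1]
          exact Set.mem_insert _ _
        · exact hcomp' d0 hd0 hg
    · next hrej =>
      obtain ⟨vis', news', heq, hsh', hV', hnd', hmem', hcomp'⟩ := ih vis q0 ma hsh
      refine ⟨vis', news', heq, hsh', hV', hnd', ?_, ?_⟩
      · intro c hc
        obtain ⟨hds, hg, hnv⟩ := hmem' c hc
        exact ⟨by simp only [List.map_cons, List.mem_cons]; exact Or.inr hds, hg, hnv⟩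
      · intro d0 hd0mem hg
        rcases List.mem_cons.mp hd0mem with rfl | hd0
        · -- the head candidate was rejected: it must already be visited
          obtain ⟨g1, g2, g3, g4, g6⟩ := hg
          obtain ⟨s7, s8⟩ := shape_guard n m vis hsh ⟨g1, g2, g3, g4⟩
          have hvt : vget vis (i + d0.1) (j + d0.2) = true := by
            by_contra hf
            exact hrej ⟨g1, g2, g3, g4, by simpa using hf, g6, s7, s8⟩
          rw [hV']
          exact Or.inl ⟨g1, g3, hvt⟩
        · exact hcomp' d0 hd0 hg

theorem mem_c4_iff (i j : Int) (d : Int × Int) :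
    d ∈ ([(i - 1, j), (i + 1, j), (i, j - 1), (i, j + 1)] : List (Int × Int)) ↔
      (i - d.1).natAbs + (j - d.2).natAbs = 1 := by
  rcases d with ⟨x, y⟩
  simp only [List.mem_cons, Prod.mk.injEq, List.not_mem_nil, or_false]
  omega

theorem c4_map (i j : Int) :
    ([(-1, 0), (1, 0), (0, -1), (0, 1)] : List (Int × Int)).map
      (fun d => (i + d.1, j + d.2)) = [(i - 1, j), (i + 1, j), (i, j - 1), (i, j + 1)] := by
  simp only [List.map_cons, List.map_nil, List.cons.injEq, Prod.mk.injEq, and_true]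
  norm_num
  omega

theorem bfs_spec (n m : Int) (arr : List (List Int)) :
    ∀ (queue : List (Int × Int)) (vis : List (List Bool)) (ma : Int),
      Shape n m vis →
      (∀ c ∈ queue, Good n m arr c ∧ c ∈ VSet vis) →
      (∀ c ∈ VSet vis, c ∉ queue → ∀ d, Adj n m arr c d → d ∈ VSet vis) →
      VSet vis ⊆ {c | Good n m arr c} →
      (bfs n m arr queue vis ma).1 = ma + (((RSet n m arr queue \ VSet vis).ncard : Nat) : Int) ∧
      VSet (bfs n m arr queue vis ma).2 = VSet vis ∪ RSet n m arr queue ∧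
      Shape n m (bfs n m arr queue vis ma).2 := by
  intro queue vis ma
  induction queue, vis, ma using bfs.induct n m arr with
  | case1 vis ma =>
    intro hsh _hq _hcl _hg
    rw [bfs]
    refine ⟨by simp [RSet_nil], by simp [RSet_nil], hsh⟩
  | case2 vis ma i j rest s ih =>
    intro hsh hq hcl hg
    obtain ⟨hgood_ij, hij_V⟩ := hq (i, j) List.mem_cons_self
    obtain ⟨vis1, news, heq, hsh1, hV1, hnd, hmem, hcomp⟩ :=
      bfsFold_spec n m arr i j [(-1, 0), (1, 0), (0, -1), (0, 1)] vis rest ma hsh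
    have hstep : bfsStep n m arr i j (vis, rest, ma) =
        (vis1, rest ++ news, ma + (news.length : Int)) := by
      unfold bfsStep; exact heq
    have hs : s = (vis1, rest ++ news, ma + (news.length : Int)) := hstep
    rw [hs] at ih
    rw [bfs]
    rw [hstep]
    -- adjacency of the accepted neighbours
    have hadjnews : ∀ c ∈ news, Adj n m arr (i, j) c := by
      intro c hc
      refine ⟨hgood_ij, (hmem c hc).2.1, ?_⟩
      have h1 := (hmem c hc).1
      rw [c4_map] at h1
      exact (mem_c4_iff i j c).1 h1
    -- invariants for the recursive call
    have hq1 : ∀ c ∈ rest ++ news, Good n m arr c ∧ c ∈ VSet vis1 := by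
      intro c hc
      rcases List.mem_append.mp hc with hc | hc
      · obtain ⟨hgc, hvc⟩ := hq c (List.mem_cons_of_mem _ hc)
        exact ⟨hgc, by rw [hV1]; exact Or.inl hvc⟩
      · exact ⟨(hmem c hc).2.1, by rw [hV1]; exact Or.inr hc⟩
    have hcl1 : ∀ c ∈ VSet vis1, c ∉ rest ++ news →
        ∀ d, Adj n m arr c d → d ∈ VSet vis1 := by
      intro c hcV1 hcq d hadj
      rw [hV1] at hcV1
      rcases hcV1 with hcV | hcN
      · by_cases hci : c = (i, j)
        · subst hci
          have hgd : Good n m arr d := hadj.2.1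
          have hd4 : d ∈ ([(i - 1, j), (i + 1, j), (i, j - 1), (i, j + 1)] :
              List (Int × Int)) := (mem_c4_iff i j d).2 hadj.2.2
          rw [← c4_map] at hd4
          obtain ⟨d0, hd0, hfd⟩ := List.mem_map.mp hd4
          have := hcomp d0 hd0 (by rw [hfd]; exact hgd)
          rwa [hfd] at this
        · have hcnq : c ∉ (i, j) :: rest := by
            intro hcc
            rcases List.mem_cons.mp hcc with h | h
            · exact hci h
            · exact hcq (List.mem_append_left _ h)
          rw [hV1]
          exact Or.inl (hcl c hcV hcnq d hadj)
      · exact absurd (List.mem_append_right _ hcN) hcq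
    have hg1 : VSet vis1 ⊆ {c | Good n m arr c} := by
      rw [hV1]
      rintro c (hc | hc)
      · exact hg hc
      · exact (hmem c hc).2.1
    have ihc := ih hsh1 hq1 hcl1 hg1
    -- set bookkeeping
    have hNR : LSet news ⊆ RSet n m arr ((i, j) :: rest) := by
      intro c hc
      exact ⟨(i, j), List.mem_cons_self, Relation.ReflTransGen.single (hadjnews c hc)⟩
    have hR1R : RSet n m arr (rest ++ news) ⊆ RSet n m arr ((i, j) :: rest) := by
      rintro d ⟨c, hc, hr⟩
      rcases List.mem_append.mp hc with hc | hc
      · exact ⟨c, List.mem_cons_of_mem _ hc, hr⟩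
      · exact ⟨(i, j), List.mem_cons_self,
          Relation.ReflTransGen.trans
            (Relation.ReflTransGen.single (hadjnews c hc)) hr⟩
    have hclosedW : Closed n m arr (VSet vis1 ∪ RSet n m arr (rest ++ news)) :=
      union_RSet_closed n m arr (rest ++ news) (VSet vis1)
        (fun c h => (hq1 c h).2) hcl1
    have hW : VSet vis1 ∪ RSet n m arr (rest ++ news) =
        VSet vis ∪ RSet n m arr ((i, j) :: rest) := by
      apply Set.Subset.antisymm
      · rintro x (hx | hx)
        · rw [hV1] at hx
          rcases hx with hx | hx
          · exact Or.inl hx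
          · exact Or.inr (hNR hx)
        · exact Or.inr (hR1R hx)
      · rintro x (hx | hx)
        · exact Or.inl (by rw [hV1]; exact Or.inl hx)
        · obtain ⟨c, hcq, hr⟩ := hx
          rcases List.mem_cons.mp hcq with hcij | hc
          · subst hcij
            have hstart : (i, j) ∈ VSet vis1 ∪ RSet n m arr (rest ++ news) :=
              Or.inl (by rw [hV1]; exact Or.inl hij_V)
            exact reach_mem_closed n m arr hclosedW hstart hr
          · exact Or.inr ⟨c, List.mem_append_left _ hc, hr⟩
    have hdiff : RSet n m arr ((i, j) :: rest) \ VSet vis =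
        LSet news ∪ (RSet n m arr (rest ++ news) \ VSet vis1) := by
      ext x
      constructor
      · rintro ⟨hxR, hxV⟩
        have hx' : x ∈ VSet vis1 ∪ RSet n m arr (rest ++ news) := by
          rw [hW]; exact Or.inr hxR
        by_cases hxN : x ∈ LSet news
        · exact Or.inl hxN
        · rcases hx' with hx' | hx'
          · rw [hV1] at hx'
            rcases hx' with hx' | hx'
            · exact absurd hx' hxV
            · exact absurd hx' hxN
          · refine Or.inr ⟨hx', ?_⟩
            rw [hV1]
            rintro (h | h)
            · exact hxV h
            · exact hxN h
      · rintro (hx | ⟨hx1, hx2⟩)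
        · exact ⟨hNR hx, (hmem x hx).2.2⟩
        · exact ⟨hR1R hx1, fun hv => hx2 (by rw [hV1]; exact Or.inl hv)⟩
    have hdisj : Disjoint (LSet news) (RSet n m arr (rest ++ news) \ VSet vis1) := by
      rw [Set.disjoint_left]
      intro x hxN hx
      exact hx.2 (by rw [hV1]; exact Or.inr hxN)
    have hfinN : (LSet news).Finite := LSet_finite news
    have hfinR1 : (RSet n m arr (rest ++ news) \ VSet vis1).Finite :=
      Set.Finite.subset (good_finite n m arr)
        (fun x hx => rset_sub_good n m arr _ (fun c h => (hq1 c h).1) hx.1)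
    have hcard : (RSet n m arr ((i, j) :: rest) \ VSet vis).ncard =
        news.length + (RSet n m arr (rest ++ news) \ VSet vis1).ncard := by
      rw [hdiff, Set.ncard_union_eq hdisj hfinN hfinR1, ncard_LSet_of_nodup news hnd]
    refine ⟨?_, ?_, ihc.2.2⟩
    · rw [ihc.1, hcard]
      push_cast
      ring
    · exact (ihc.2.1).trans hW

-- ===== outer loops: common grid-cell list =====

theorem foldl_nested {σ : Type} (f : σ → Int × Int → σ) (l1 l2 : List Int) :
    ∀ s : σ, l1.foldl (fun s i => l2.foldl (fun s j => f s (i, j)) s) s =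
      (l1.flatMap (fun i => l2.map (fun j => (i, j)))).foldl f s := by
  induction l1 with
  | nil => intro s; simp
  | cons a l1 ih =>
    intro s
    rw [List.foldl_cons, List.flatMap_cons, List.foldl_append, List.foldl_map, ih]

def cells (n m : Int) : List (Int × Int) :=
  (PySem.List.pyRange 0 n 1).flatMap fun i => (PySem.List.pyRange 0 m 1).map fun j => (i, j)

theorem mem_cells (n m : Int) (c : Int × Int) :
    c ∈ cells n m ↔ 0 ≤ c.1 ∧ c.1 < n ∧ 0 ≤ c.2 ∧ c.2 < m := by
  simp only [cells, List.mem_flatMap, List.mem_map]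
  constructor
  · rintro ⟨i, hi, j, hj, rfl⟩
    rw [PySem.List.mem_pyRange_one] at hi hj
    exact ⟨hi.1, hi.2, hj.1, hj.2⟩
  · rintro ⟨h1, h2, h3, h4⟩
    exact ⟨c.1, (PySem.List.mem_pyRange_one).2 ⟨h1, h2⟩,
      c.2, (PySem.List.mem_pyRange_one).2 ⟨h3, h4⟩, rfl⟩

theorem cells_nodup (n m : Int) : (cells n m).Nodup := by
  have := List.Nodup.product (PySem.List.nodup_pyRange_one 0 n) (PySem.List.nodup_pyRange_one 0 m)
  simpa [cells, List.product, SProd.sprod] using this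

-- ===== B-side: union-find theory =====

def Mono (p : List Int) : Prop :=
  ∀ x : Int, 0 ≤ x → x < (p.length : Int) → 0 ≤ pread p x ∧ pread p x ≤ x

theorem root_bounds (p : List Int) : ∀ x : Int, 0 ≤ x → 0 ≤ rootF p x ∧ rootF p x ≤ x := by
  intro x
  induction x using rootF.induct p with
  | case1 x h ih =>
    intro _
    rw [rootF, dif_pos h]
    have := ih h.1
    omega
  | case2 x h =>
    intro hx
    rw [rootF, dif_neg h]
    omega

theorem root_of_fix (p : List Int) (x : Int) (h : pread p x = x) : rootF p x = x := by
  rw [rootF, dif_neg (by omega)]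

theorem root_fix (p : List Int) (hM : Mono p) :
    ∀ x : Int, 0 ≤ x → x < (p.length : Int) → pread p (rootF p x) = rootF p x := by
  intro x
  induction x using rootF.induct p with
  | case1 x h ih =>
    intro hx hlen
    rw [rootF, dif_pos h]
    exact ih h.1 (by omega)
  | case2 x h =>
    intro hx hlen
    rw [rootF, dif_neg h]
    have := hM x hx hlen
    have : pread p x = x := by omega
    exact this

theorem pread_set (p : List Int) (bg sm : Int) (hbg0 : 0 ≤ bg)
    (hlen : bg < (p.length : Int)) (y : Int) (hy : 0 ≤ y) :
    pread (p.set bg.toNat sm) y = if y = bg then sm else pread p y := by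
  unfold pread
  by_cases h : y = bg
  · rw [if_pos h, h]
    exact getD_set_self p bg.toNat sm _ (by omega)
  · rw [if_neg h]
    exact getD_set_ne p bg.toNat y.toNat sm _ (by omega)

theorem rootF_set (p : List Int) (hM : Mono p) (sm bg : Int)
    (h0 : 0 ≤ sm) (hlt : sm < bg) (hlen : bg < (p.length : Int))
    (hsm : pread p sm = sm) (hbg : pread p bg = bg) :
    ∀ x : Int, 0 ≤ x → x < (p.length : Int) →
      rootF (p.set bg.toNat sm) x = if rootF p x = bg then sm else rootF p x := by
  have hbg0 : 0 ≤ bg := by omega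
  have key : ∀ k : Nat, ∀ x : Int, x.toNat < k → 0 ≤ x → x < (p.length : Int) →
      rootF (p.set bg.toNat sm) x = if rootF p x = bg then sm else rootF p x := by
    intro k
    induction k with
    | zero => intro x h; omega
    | succ k ih =>
      intro x hk hx hlenx
      by_cases hxbg : x = bg
      · rw [hxbg]
        have h1 : pread (p.set bg.toNat sm) bg = sm := by
          rw [pread_set p bg sm hbg0 hlen bg hbg0, if_pos rfl]
        have h2 : rootF (p.set bg.toNat sm) bg = rootF (p.set bg.toNat sm) sm := by
          rw [rootF, dif_pos (by rw [h1]; exact ⟨h0, hlt⟩), h1]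
        have h3 : pread (p.set bg.toNat sm) sm = sm := by
          rw [pread_set p bg sm hbg0 hlen sm h0, if_neg (by omega), hsm]
        rw [h2, root_of_fix _ _ h3, root_of_fix p bg hbg, if_pos rfl]
      · have hpr : pread (p.set bg.toNat sm) x = pread p x := by
          rw [pread_set p bg sm hbg0 hlen x hx, if_neg hxbg]
        by_cases hrec : 0 ≤ pread p x ∧ pread p x < x
        · have hL : rootF (p.set bg.toNat sm) x = rootF (p.set bg.toNat sm) (pread p x) := by
            rw [rootF, dif_pos (by rw [hpr]; exact hrec), hpr]
          have hR : rootF p x = rootF p (pread p x) := by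
            rw [rootF, dif_pos hrec]
          rw [hL, hR]
          exact ih (pread p x) (by omega) hrec.1 (by omega)
        · have hfix : pread p x = x := by
            have := hM x hx hlenx; omega
          rw [root_of_fix p x hfix]
          have : pread (p.set bg.toNat sm) x = x := by rw [hpr, hfix]
          rw [root_of_fix _ _ this, if_neg hxbg]
  intro x hx hlenx
  exact key (x.toNat + 1) x (by omega) hx hlenx

def InR (nm x : Int) : Prop := 0 ≤ x ∧ x < nm

def ERel (E : List (Int × Int)) : Int → Int → Prop := fun x y => (x, y) ∈ E

def EClo (E : List (Int × Int)) : Int → Int → Prop := Relation.EqvGen (ERel E)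

def UF (nm : Int) (p : List Int) (E : List (Int × Int)) : Prop :=
  (p.length : Int) = max nm 0 ∧ Mono p ∧
  ∀ x y, InR nm x → InR nm y → (rootF p x = rootF p y ↔ EClo E x y)

theorem eclo_nil (x y : Int) : EClo [] x y ↔ x = y := by
  constructor
  · intro h
    induction h with
    | rel _ _ h => exact absurd h (List.not_mem_nil)
    | refl => rfl
    | symm _ _ _ ih => omega
    | trans _ _ _ _ _ ih1 ih2 => omega
  · rintro rfl
    exact Relation.EqvGen.refl x

theorem eclo_mono {E : List (Int × Int)} (e : Int × Int) {x y : Int} (h : EClo E x y) :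
    EClo (E ++ [e]) x y :=
  Relation.EqvGen.mono (fun _ _ hm => List.mem_append_left _ hm) h

theorem eclo_append_single (E : List (Int × Int)) (a b x y : Int) :
    EClo (E ++ [(a, b)]) x y ↔
      EClo E x y ∨ (EClo E x a ∧ EClo E b y) ∨ (EClo E x b ∧ EClo E a y) := by
  constructor
  · intro h
    induction h with
    | rel u v huv =>
      rcases List.mem_append.mp huv with h | h
      · exact Or.inl (Relation.EqvGen.rel u v h)
      · rw [List.mem_singleton] at h
        obtain ⟨rfl, rfl⟩ := Prod.mk.injEq .. ▸ h
        exact Or.inr (Or.inl ⟨Relation.EqvGen.refl _, Relation.EqvGen.refl _⟩)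
    | refl => exact Or.inl (Relation.EqvGen.refl _)
    | symm u v _ ih =>
      rcases ih with h | ⟨h1, h2⟩ | ⟨h1, h2⟩
      · exact Or.inl (Relation.EqvGen.symm _ _ h)
      · exact Or.inr (Or.inr ⟨Relation.EqvGen.symm _ _ h2, Relation.EqvGen.symm _ _ h1⟩)
      · exact Or.inr (Or.inl ⟨Relation.EqvGen.symm _ _ h2, Relation.EqvGen.symm _ _ h1⟩)
    | trans u v w _ _ ih1 ih2 =>
      have tr : ∀ {x y z : Int}, EClo E x y → EClo E y z → EClo E x z :=
        fun h1 h2 => Relation.EqvGen.trans _ _ _ h1 h2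
      have sy : ∀ {x y : Int}, EClo E x y → EClo E y x :=
        fun h => Relation.EqvGen.symm _ _ h
      rcases ih1 with h1 | ⟨h1, h1'⟩ | ⟨h1, h1'⟩ <;>
        rcases ih2 with h2 | ⟨h2, h2'⟩ | ⟨h2, h2'⟩
      · exact Or.inl (tr h1 h2)
      · exact Or.inr (Or.inl ⟨tr h1 h2, h2'⟩)
      · exact Or.inr (Or.inr ⟨tr h1 h2, h2'⟩)
      · exact Or.inr (Or.inl ⟨h1, tr h1' h2⟩)
      · exact Or.inl (tr h1 (tr (sy (tr h1' h2)) h2'))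
      · exact Or.inl (tr h1 h2')
      · exact Or.inr (Or.inr ⟨h1, tr h1' h2⟩)
      · exact Or.inl (tr h1 h2')
      · exact Or.inl (tr h1 (tr (sy (tr h1' h2)) h2'))
  · have hrel : EClo (E ++ [(a, b)]) a b :=
      Relation.EqvGen.rel _ _ (List.mem_append_right _ (List.mem_singleton.mpr rfl))
    rintro (h | ⟨h1, h2⟩ | ⟨h1, h2⟩)
    · exact eclo_mono _ h
    · exact Relation.EqvGen.trans _ _ _ (eclo_mono _ h1)
        (Relation.EqvGen.trans _ _ _ hrel (eclo_mono _ h2))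
    · exact Relation.EqvGen.trans _ _ _ (eclo_mono _ h1)
        (Relation.EqvGen.trans _ _ _ (Relation.EqvGen.symm _ _ hrel) (eclo_mono _ h2))

theorem UF_set (nm : Int) (p : List Int) (E : List (Int × Int)) (a b : Int)
    (h : UF nm p E) (ha : InR nm a) (hb : InR nm b) (sm bg : Int)
    (hor : (sm = rootF p a ∧ bg = rootF p b) ∨ (sm = rootF p b ∧ bg = rootF p a))
    (hlt : sm < bg) :
    UF nm (p.set bg.toNat sm) (E ++ [(a, b)]) := by
  obtain ⟨hlen, hM, hiff⟩ := h
  obtain ⟨ha1, ha2⟩ := ha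
  obtain ⟨hb1, hb2⟩ := hb
  have hra := root_bounds p a ha1
  have hrb := root_bounds p b hb1
  have h0sm : 0 ≤ sm := by rcases hor with ⟨h1, _⟩ | ⟨h1, _⟩ <;> omega
  have hbglen : bg < (p.length : Int) := by
    rcases hor with ⟨_, h2⟩ | ⟨_, h2⟩ <;> (rw [hlen]; omega)
  have hsmlen : sm < (p.length : Int) := by omega
  have hsmfix : pread p sm = sm := by
    rcases hor with ⟨h1, _⟩ | ⟨h1, _⟩ <;>
      (rw [h1]; exact root_fix p hM _ (by omega) (by rw [hlen]; omega))
  have hbgfix : pread p bg = bg := by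
    rcases hor with ⟨_, h2⟩ | ⟨_, h2⟩ <;>
      (rw [h2]; exact root_fix p hM _ (by omega) (by rw [hlen]; omega))
  have hform := rootF_set p hM sm bg h0sm hlt hbglen hsmfix hbgfix
  refine ⟨by rw [List.length_set]; exact hlen, ?_, ?_⟩
  · intro y hy hylen
    rw [List.length_set] at hylen
    rw [pread_set p bg sm (by omega) hbglen y hy]
    by_cases hybg : y = bg
    · rw [if_pos hybg]; omega
    · rw [if_neg hybg]; exact hM y hy hylen
  · intro x y hx hy
    obtain ⟨hx1, hx2⟩ := hx
    obtain ⟨hy1, hy2⟩ := hy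
    have hx : InR nm x := ⟨hx1, hx2⟩
    have hy : InR nm y := ⟨hy1, hy2⟩
    have ha : InR nm a := ⟨ha1, ha2⟩
    have hb : InR nm b := ⟨hb1, hb2⟩
    have hxlen : x < (p.length : Int) := by rw [hlen]; omega
    have hylen : y < (p.length : Int) := by rw [hlen]; omega
    rw [hform x hx1 hxlen, hform y hy1 hylen, eclo_append_single]
    have hxa : rootF p x = rootF p a ↔ EClo E x a := hiff x a hx ha
    have hxb : rootF p x = rootF p b ↔ EClo E x b := hiff x b hx hb
    have hya : rootF p y = rootF p a ↔ EClo E y a := hiff y a hy ha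
    have hyb : rootF p y = rootF p b ↔ EClo E y b := hiff y b hy hb
    have hxy : rootF p x = rootF p y ↔ EClo E x y := hiff x y hx hy
    have hne : sm ≠ bg := by omega
    have sy : ∀ {u v : Int}, EClo E u v → EClo E v u :=
      fun h => Relation.EqvGen.symm _ _ h
    constructor
    · intro heq
      split_ifs at heq with h1 h2 h2
      · exact Or.inl (hxy.1 (by omega))
      · -- rootF p x = bg, rootF p y = sm
        rcases hor with ⟨hsm', hbg'⟩ | ⟨hsm', hbg'⟩
        · -- sm = ra, bg = rb : x ~ b, y ~ a
          exact Or.inr (Or.inr ⟨hxb.1 (by omega), sy (hya.1 (by omega))⟩)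
        · -- sm = rb, bg = ra : x ~ a, y ~ b
          exact Or.inr (Or.inl ⟨hxa.1 (by omega), sy (hyb.1 (by omega))⟩)
      · -- rootF p x = sm, rootF p y = bg
        rcases hor with ⟨hsm', hbg'⟩ | ⟨hsm', hbg'⟩
        · exact Or.inr (Or.inl ⟨hxa.1 (by omega), sy (hyb.1 (by omega))⟩)
        · exact Or.inr (Or.inr ⟨hxb.1 (by omega), sy (hya.1 (by omega))⟩)
      · exact Or.inl (hxy.1 heq)
    · rintro (h | ⟨h1, h2⟩ | ⟨h1, h2⟩)
      · rw [hxy.2 h]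
      · -- x ~ a, b ~ y
        have e1 : rootF p x = rootF p a := hxa.2 h1
        have e2 : rootF p y = rootF p b := hyb.2 (sy h2)
        rcases hor with ⟨hsm', hbg'⟩ | ⟨hsm', hbg'⟩ <;> split_ifs <;> omega
      · have e1 : rootF p x = rootF p b := hxb.2 h1
        have e2 : rootF p y = rootF p a := hya.2 (sy h2)
        rcases hor with ⟨hsm', hbg'⟩ | ⟨hsm', hbg'⟩ <;> split_ifs <;> omega

theorem UF_union (nm : Int) (p : List Int) (E : List (Int × Int)) (a b : Int)
    (h : UF nm p E) (ha : InR nm a) (hb : InR nm b) :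
    UF nm (unionF p a b) (E ++ [(a, b)]) := by
  unfold unionF
  by_cases hrr : rootF p a = rootF p b
  · rw [if_neg (by simpa using hrr)]
    obtain ⟨hlen, hM, hiff⟩ := h
    have hab : EClo E a b := (hiff a b ha hb).1 hrr
    have sy : ∀ {u v : Int}, EClo E u v → EClo E v u :=
      fun h => Relation.EqvGen.symm _ _ h
    have tr : ∀ {x y z : Int}, EClo E x y → EClo E y z → EClo E x z :=
      fun h1 h2 => Relation.EqvGen.trans _ _ _ h1 h2
    refine ⟨hlen, hM, ?_⟩
    intro x y hx hy
    rw [hiff x y hx hy, eclo_append_single]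
    constructor
    · exact Or.inl
    · rintro (h | ⟨h1, h2⟩ | ⟨h1, h2⟩)
      · exact h
      · exact tr h1 (tr hab h2)
      · exact tr h1 (tr (sy hab) h2)
  · rw [if_pos hrr]
    by_cases hlt : rootF p a < rootF p b
    · rw [if_pos hlt]
      exact UF_set nm p E a b h ha hb _ _ (Or.inl ⟨rfl, rfl⟩) hlt
    · rw [if_neg hlt]
      exact UF_set nm p E a b h ha hb _ _ (Or.inr ⟨rfl, rfl⟩) (by omega)

theorem UF_foldl (nm : Int) :
    ∀ (E2 : List (Int × Int)) (p : List Int) (E1 : List (Int × Int)),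
      UF nm p E1 → (∀ e ∈ E2, InR nm e.1 ∧ InR nm e.2) →
      UF nm (E2.foldl (fun p e => unionF p e.1 e.2) p) (E1 ++ E2) := by
  intro E2
  induction E2 with
  | nil => intro p E1 h _; simpa using h
  | cons e E2 ih =>
    intro p E1 h hin
    rw [List.foldl_cons]
    have h1 := UF_union nm p E1 e.1 e.2 h (hin e List.mem_cons_self).1 (hin e List.mem_cons_self).2
    have := ih (unionF p e.1 e.2) (E1 ++ [e]) (by simpa using h1)
      (fun e' he' => hin e' (List.mem_cons_of_mem _ he'))
    simpa [List.append_assoc] using this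

theorem UF_init (nm : Int) :
    UF nm ((List.range nm.toNat).map (fun k : Nat => (k : Int))) [] := by
  have hlen : (((List.range nm.toNat).map (fun k : Nat => (k : Int))).length : Int) = max nm 0 := by
    have h : ((List.range nm.toNat).map (fun k : Nat => (k : Int))).length = nm.toNat := by simp
    omega
  have hpr : ∀ x : Int, 0 ≤ x → x < (((List.range nm.toNat).map (fun k : Nat => (k : Int))).length : Int) →
      pread ((List.range nm.toNat).map (fun k : Nat => (k : Int))) x = x := by
    intro x hx hxl
    have hxl' : x.toNat < ((List.range nm.toNat).map (fun k : Nat => (k : Int))).length := by omega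
    unfold pread
    rw [List.getD_eq_getElem _ _ hxl']
    rw [List.getElem_map, List.getElem_range]
    omega
  refine ⟨hlen, ?_, ?_⟩
  · intro x hx hxl
    rw [hpr x hx hxl]
    omega
  · intro x y hx hy
    obtain ⟨hx1, hx2⟩ := hx
    obtain ⟨hy1, hy2⟩ := hy
    rw [root_of_fix _ _ (hpr x hx1 (by rw [hlen]; omega)),
      root_of_fix _ _ (hpr y hy1 (by rw [hlen]; omega)), eclo_nil]



-- the common specification value both programs compute: a running max over the grid
-- cells of the component size of each server cell
-- ===== A-side: outer loop invariant =====

def stepA (n m : Int) (arr : List (List Int)) (s : List (List Bool) × Int)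
    (c : Int × Int) : List (List Bool) × Int :=
  if aget arr c.1 c.2 ≠ 0 then
    let r := bfs n m arr [(c.1, c.2)] (vset s.1 c.1 c.2) 1
    (r.2, max s.2 r.1)
  else s

theorem rset_singleton_congr (n m : Int) (arr : List (List Int)) {c d : Int × Int}
    (h : Reach n m arr c d) : RSet n m arr [c] = RSet n m arr [d] := by
  ext x
  simp only [RSet, Set.mem_setOf_eq, List.mem_singleton]
  constructor
  · rintro ⟨y, rfl, hr⟩
    exact ⟨d, rfl, Relation.ReflTransGen.trans (reach_symm n m arr h) hr⟩
  · rintro ⟨y, rfl, hr⟩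
    exact ⟨c, rfl, Relation.ReflTransGen.trans h hr⟩

theorem rset_singleton_finite (n m : Int) (arr : List (List Int)) (c : Int × Int)
    (hc : Good n m arr c) : (RSet n m arr [c]).Finite :=
  Set.Finite.subset (good_finite n m arr)
    (rset_sub_good n m arr [c] (by simpa using hc))

theorem mem_rset_self (n m : Int) (arr : List (List Int)) (c : Int × Int) :
    c ∈ RSet n m arr [c] :=
  ⟨c, List.mem_singleton.mpr rfl, Relation.ReflTransGen.refl⟩

theorem rset_ncard_pos (n m : Int) (arr : List (List Int)) (c : Int × Int)
    (hc : Good n m arr c) : 0 < (RSet n m arr [c]).ncard :=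
  (Set.ncard_pos (rset_singleton_finite n m arr c hc)).2 ⟨c, mem_rset_self n m arr c⟩

def InvA (n m : Int) (arr : List (List Int)) (s : List (List Bool) × Int) : Prop :=
  Shape n m s.1 ∧ VSet s.1 ⊆ {c | Good n m arr c} ∧ Closed n m arr (VSet s.1) ∧
  (∀ c, Good n m arr c → c ∈ VSet s.1 →
    (((RSet n m arr [c]).ncard : Nat) : Int) ≤ s.2)

theorem stepA_inv (n m : Int) (arr : List (List Int)) (c : Int × Int)
    (hb : 0 ≤ c.1 ∧ c.1 < n ∧ 0 ≤ c.2 ∧ c.2 < m)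
    (s : List (List Bool) × Int) (h : InvA n m arr s) :
    InvA n m arr (stepA n m arr s c) ∧
    (stepA n m arr s c).2 = (if aget arr c.1 c.2 ≠ 0 then
      max s.2 (((RSet n m arr [c]).ncard : Nat) : Int) else s.2) := by
  obtain ⟨hsh, hsub, hcl, hbest⟩ := h
  unfold stepA
  by_cases htr : aget arr c.1 c.2 ≠ 0
  swap
  · rw [if_neg htr, if_neg htr]
    exact ⟨⟨hsh, hsub, hcl, hbest⟩, rfl⟩
  rw [if_pos htr, if_pos htr]
  dsimp only
  have hgc : Good n m arr c := ⟨hb.1, hb.2.1, hb.2.2.1, hb.2.2.2, htr⟩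
  have hcc : ((c.1, c.2) : Int × Int) = c := rfl
  obtain ⟨s7, s8⟩ := shape_guard n m s.1 hsh hb
  have hsha : Shape n m (vset s.1 c.1 c.2) := shape_vset n m s.1 c.1 c.2 hsh s7
  have hVva : VSet (vset s.1 c.1 c.2) = insert c (VSet s.1) := by
    rw [VSet_vset n m s.1 c.1 c.2 hsh hb, hcc]
  have hq : ∀ x ∈ ([(c.1, c.2)] : List (Int × Int)),
      Good n m arr x ∧ x ∈ VSet (vset s.1 c.1 c.2) := by
    intro x hx
    rw [List.mem_singleton] at hx
    subst hx
    exact ⟨hgc, by rw [hVva]; exact Set.mem_insert _ _⟩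
  have hcl' : ∀ x ∈ VSet (vset s.1 c.1 c.2), x ∉ ([(c.1, c.2)] : List (Int × Int)) →
      ∀ d, Adj n m arr x d → d ∈ VSet (vset s.1 c.1 c.2) := by
    intro x hx hxq d hadj
    rw [hVva] at hx ⊢
    rcases hx with rfl | hx
    · exact absurd (List.mem_singleton.mpr rfl) hxq
    · exact Set.mem_insert_of_mem _ (hcl x hx d hadj)
  have hg' : VSet (vset s.1 c.1 c.2) ⊆ {x | Good n m arr x} := by
    rw [hVva]
    exact Set.insert_subset hgc hsub
  obtain ⟨hval, hset, hshape'⟩ :=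
    bfs_spec n m arr [(c.1, c.2)] (vset s.1 c.1 c.2) 1 hsha hq hcl' hg'
  have hRc : RSet n m arr [(c.1, c.2)] = RSet n m arr [c] := by rw [hcc]
  by_cases hcV : c ∈ VSet s.1
  · -- already-visited server cell: BFS returns 1
    have hRV : RSet n m arr [c] ⊆ VSet s.1 := by
      rintro d ⟨y, hy, hr⟩
      rw [List.mem_singleton] at hy
      subst hy
      exact reach_mem_closed n m arr hcl hcV hr
    have hempty : RSet n m arr [(c.1, c.2)] \ VSet (vset s.1 c.1 c.2) = ∅ := by
      rw [hRc, hVva]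
      exact Set.diff_eq_empty.2 (hRV.trans (Set.subset_insert _ _))
    have hval1 : (bfs n m arr [(c.1, c.2)] (vset s.1 c.1 c.2) 1).1 = 1 := by
      rw [hval, hempty]
      simp
    have hset1 : VSet (bfs n m arr [(c.1, c.2)] (vset s.1 c.1 c.2) 1).2 = VSet s.1 := by
      rw [hset, hVva, hRc]
      apply Set.Subset.antisymm
      · apply Set.union_subset
        · exact Set.insert_subset hcV (subset_refl _)
        · exact hRV
      · exact (Set.subset_insert _ _).trans Set.subset_union_left
    have hle : (((RSet n m arr [c]).ncard : Nat) : Int) ≤ s.2 := hbest c hgc hcV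
    have hge1 : (1 : Int) ≤ (((RSet n m arr [c]).ncard : Nat) : Int) := by
      have := rset_ncard_pos n m arr c hgc
      omega
    refine ⟨⟨hshape', by rw [hset1]; exact hsub, by rw [hset1]; exact hcl, ?_⟩, ?_⟩
    · intro d hd hdV
      rw [hset1] at hdV
      have := hbest d hd hdV
      rw [hval1]
      omega
    · rw [hval1]
      omega
  · -- fresh server cell: BFS counts exactly the component of c
    have hdisj : ∀ x ∈ RSet n m arr [c], x ∉ VSet s.1 := by
      rintro x ⟨y, hy, hr⟩ hxV
      rw [List.mem_singleton] at hy
      subst hy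
      exact hcV (reach_mem_closed n m arr hcl hxV (reach_symm n m arr hr))
    have hdm : RSet n m arr [(c.1, c.2)] \ VSet (vset s.1 c.1 c.2) =
        RSet n m arr [c] \ {c} := by
      rw [hRc, hVva]
      ext x
      simp only [Set.mem_diff, Set.mem_insert_iff, Set.mem_singleton_iff, not_or]
      constructor
      · rintro ⟨hx1, hx2, _⟩
        exact ⟨hx1, hx2⟩
      · rintro ⟨hx1, hx2⟩
        exact ⟨hx1, hx2, hdisj x hx1⟩
    have hfin := rset_singleton_finite n m arr c hgc
    have hpos := rset_ncard_pos n m arr c hgc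
    have hncard : (RSet n m arr [c] \ {c}).ncard = (RSet n m arr [c]).ncard - 1 :=
      Set.ncard_diff_singleton_of_mem (mem_rset_self n m arr c)
    have hval1 : (bfs n m arr [(c.1, c.2)] (vset s.1 c.1 c.2) 1).1 =
        (((RSet n m arr [c]).ncard : Nat) : Int) := by
      rw [hval, hdm, hncard]
      omega
    have hset1 : VSet (bfs n m arr [(c.1, c.2)] (vset s.1 c.1 c.2) 1).2 =
        VSet s.1 ∪ RSet n m arr [c] := by
      rw [hset, hVva, hRc]
      have : insert c (VSet s.1) ∪ RSet n m arr [c] =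
          VSet s.1 ∪ RSet n m arr [c] := by
        apply Set.Subset.antisymm
        · apply Set.union_subset
          · exact Set.insert_subset (Or.inr (mem_rset_self n m arr c)) Set.subset_union_left
          · exact Set.subset_union_right
        · exact Set.union_subset
            ((Set.subset_insert _ _).trans Set.subset_union_left) Set.subset_union_right
      exact this
    have hclU : Closed n m arr (VSet s.1 ∪ RSet n m arr [c]) := by
      have h1 : Closed n m arr (insert c (VSet s.1) ∪ RSet n m arr [(c.1, c.2)]) := by
        apply union_RSet_closed
        · intro x hx
          rw [List.mem_singleton] at hx
          subst hx
          exact Set.mem_insert _ _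
        · intro x hx hxq d hadj
          rcases hx with rfl | hx
          · exact absurd (List.mem_singleton.mpr rfl) hxq
          · exact Set.mem_insert_of_mem _ (hcl x hx d hadj)
      have h2 : insert c (VSet s.1) ∪ RSet n m arr [(c.1, c.2)] =
          VSet s.1 ∪ RSet n m arr [c] := by
        rw [hRc]
        apply Set.Subset.antisymm
        · apply Set.union_subset
          · exact Set.insert_subset (Or.inr (mem_rset_self n m arr c)) Set.subset_union_left
          · exact Set.subset_union_right
        · exact Set.union_subset
            ((Set.subset_insert _ _).trans Set.subset_union_left) Set.subset_union_right
      rwa [h2] at h1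
    refine ⟨⟨hshape', ?_, by rw [hset1]; exact hclU, ?_⟩, ?_⟩
    · rw [hset1]
      exact Set.union_subset hsub (rset_sub_good n m arr [c] (by simpa using hgc))
    · intro d hd hdV
      rw [hset1] at hdV
      rcases hdV with hdV | hdV
      · have := hbest d hd hdV
        refine le_trans this ?_
        exact le_max_left _ _
      · obtain ⟨y, hy, hr⟩ := hdV
        rw [List.mem_singleton] at hy
        subst hy
        rw [rset_singleton_congr n m arr (reach_symm n m arr hr), hval1]
        exact le_max_right _ _
    · rw [hval1]

theorem foldA_inv (n m : Int) (arr : List (List Int)) (l : List (Int × Int))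
    (hl : ∀ c ∈ l, 0 ≤ c.1 ∧ c.1 < n ∧ 0 ≤ c.2 ∧ c.2 < m) :
    ∀ s, InvA n m arr s →
      InvA n m arr (l.foldl (stepA n m arr) s) ∧
      (l.foldl (stepA n m arr) s).2 = l.foldl (fun b c =>
        if aget arr c.1 c.2 ≠ 0 then
          max b (((RSet n m arr [c]).ncard : Nat) : Int) else b) s.2 := by
  induction l with
  | nil => intro s h; exact ⟨h, rfl⟩
  | cons c l ih =>
    intro s h
    obtain ⟨h1, h2⟩ := stepA_inv n m arr c (hl c List.mem_cons_self) s h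
    obtain ⟨h3, h4⟩ := ih (fun x hx => hl x (List.mem_cons_of_mem _ hx)) _ h1
    refine ⟨h3, ?_⟩
    rw [List.foldl_cons, List.foldl_cons, h4, h2]

theorem getD_replicate_false (m' k : Nat) :
    (List.replicate m' false).getD k false = false := by
  by_cases hk : k < m'
  · rw [List.getD_eq_getElem _ _ (by simpa using hk), List.getElem_replicate]
  · rw [List.getD_eq_default _ _ (by simpa using hk)]

theorem Shape_init (n m : Int) :
    Shape n m (List.replicate n.toNat (List.replicate m.toNat false)) := by
  refine ⟨by simp, ?_⟩
  intro r hr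
  rw [List.eq_of_mem_replicate hr]
  simp

theorem VSet_init (n m : Int) :
    VSet (List.replicate n.toNat (List.replicate m.toNat false)) = ∅ := by
  ext ⟨a, b⟩
  simp only [VSet, Set.mem_setOf_eq, Set.mem_empty_iff_false, iff_false]
  rintro ⟨_, _, hv⟩
  unfold vget at hv
  by_cases h : a.toNat < n.toNat
  · have houter := List.getD_eq_getElem
      (List.replicate n.toNat (List.replicate m.toNat false)) []
      (n := a.toNat) (by simpa using h)
    rw [houter, List.getElem_replicate, getD_replicate_false] at hv
    exact Bool.false_ne_true hv
  · have houter := List.getD_eq_default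
      (List.replicate n.toNat (List.replicate m.toNat false)) []
      (n := a.toNat) (by simp only [List.length_replicate]; omega)
    rw [houter] at hv
    simp at hv

theorem find_eq_specval (n : Int) (m : Int) (arr : List (List Int)) :
    find n m arr = (cells n m).foldl (fun b c =>
      if aget arr c.1 c.2 ≠ 0 then
        max b (((RSet n m arr [c]).ncard : Nat) : Int) else b) 0 := by
  show ((PySem.List.pyRange 0 n 1).foldl (fun s i =>
      (PySem.List.pyRange 0 m 1).foldl (fun s j => stepA n m arr s (i, j)) s)
      (List.replicate n.toNat (List.replicate m.toNat false), 0)).2 = _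
  rw [foldl_nested (stepA n m arr)]
  have hinit : InvA n m arr
      (List.replicate n.toNat (List.replicate m.toNat false), 0) := by
    refine ⟨Shape_init n m, ?_, ?_, ?_⟩
    · show VSet _ ⊆ _
      rw [VSet_init]
      exact Set.empty_subset _
    · show Closed n m arr (VSet _)
      rw [VSet_init]
      rintro x hx d _
      exact hx.elim
    · intro c _ hc
      rw [VSet_init] at hc
      exact hc.elim
  exact (foldA_inv n m arr (cells n m) (fun c hc => (mem_cells n m c).1 hc) _ hinit).2

-- ===== B-side: edges of the grid graph and the build loop =====

def stepU (n m : Int) (arr : List (List Int)) (p : List Int) (c : Int × Int) : List Int :=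
  if aget arr c.1 c.2 ≠ 0 then
    let p1 := if c.2 + 1 < m ∧ aget arr c.1 (c.2 + 1) ≠ 0 then
        unionF p (c.1 * m + c.2) (c.1 * m + c.2 + 1) else p
    if c.1 + 1 < n ∧ aget arr (c.1 + 1) c.2 ≠ 0 then
        unionF p1 (c.1 * m + c.2) ((c.1 + 1) * m + c.2) else p1
  else p

def stepC (n m : Int) (arr : List (List Int)) (pstar : List Int)
    (cn : PySem.Dict Int Int) (c : Int × Int) : PySem.Dict Int Int :=
  if aget arr c.1 c.2 ≠ 0 then
    let r := rootF pstar (c.1 * m + c.2)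
    cn.insert r (cn.getD r 0 + 1)
  else cn

def stepM (n m : Int) (arr : List (List Int)) (pstar : List Int)
    (counts : PySem.Dict Int Int) (b : Int) (c : Int × Int) : Int :=
  if aget arr c.1 c.2 ≠ 0 then
    max b (counts.getD (rootF pstar (c.1 * m + c.2)) 0) else b

def cellEdges (n m : Int) (arr : List (List Int)) (c : Int × Int) : List (Int × Int) :=
  if aget arr c.1 c.2 ≠ 0 then
    (if c.2 + 1 < m ∧ aget arr c.1 (c.2 + 1) ≠ 0 then
      [(c.1 * m + c.2, c.1 * m + c.2 + 1)] else []) ++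
    (if c.1 + 1 < n ∧ aget arr (c.1 + 1) c.2 ≠ 0 then
      [(c.1 * m + c.2, (c.1 + 1) * m + c.2)] else [])
  else []

def Ed (n m : Int) (arr : List (List Int)) : List (Int × Int) :=
  (cells n m).flatMap (cellEdges n m arr)

theorem stepU_eq_cellEdges (n m : Int) (arr : List (List Int)) (p : List Int)
    (c : Int × Int) :
    stepU n m arr p c = (cellEdges n m arr c).foldl (fun p e => unionF p e.1 e.2) p := by
  unfold stepU cellEdges
  by_cases h0 : aget arr c.1 c.2 ≠ 0
  · rw [if_pos h0, if_pos h0]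
    by_cases h1 : c.2 + 1 < m ∧ aget arr c.1 (c.2 + 1) ≠ 0 <;>
      by_cases h2 : c.1 + 1 < n ∧ aget arr (c.1 + 1) c.2 ≠ 0 <;>
      simp [h1, h2]
  · rw [if_neg h0, if_neg h0]
    rfl

theorem foldl_flatMap {σ α β : Type} (g : σ → α → σ) (h : α → List β) (f : σ → β → σ)
    (hgf : ∀ s a, g s a = (h a).foldl f s) :
    ∀ (l : List α) (s : σ), l.foldl g s = (l.flatMap h).foldl f s := by
  intro l
  induction l with
  | nil => intro s; simp
  | cons a l ih =>
    intro s
    rw [List.foldl_cons, List.flatMap_cons, List.foldl_append, ← hgf, ih]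

theorem enc_bounds (n m i j : Int) (hi : 0 ≤ i) (hi' : i < n) (hj : 0 ≤ j) (hj' : j < m) :
    InR (n * m) (i * m + j) := by
  constructor
  · exact add_nonneg (mul_nonneg hi (by omega)) hj
  · have h2 : (i + 1) * m ≤ n * m := mul_le_mul_of_nonneg_right (by omega) (by omega)
    have h3 : (i + 1) * m = i * m + m := by ring
    linarith

theorem enc_inj (m : Int) (c d : Int × Int) (hc : 0 ≤ c.2 ∧ c.2 < m)
    (hd : 0 ≤ d.2 ∧ d.2 < m) (h : c.1 * m + c.2 = d.1 * m + d.2) : c = d := by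
  rcases lt_trichotomy c.1 d.1 with hlt | heq | hlt
  · exfalso
    have h2 : (c.1 + 1) * m ≤ d.1 * m := mul_le_mul_of_nonneg_right (by omega) (by omega)
    have h3 : (c.1 + 1) * m = c.1 * m + m := by ring
    linarith
  · have : c.1 * m = d.1 * m := by rw [heq]
    have h2 : c.2 = d.2 := by linarith
    exact Prod.ext_iff.2 ⟨heq, h2⟩
  · exfalso
    have h2 : (d.1 + 1) * m ≤ c.1 * m := mul_le_mul_of_nonneg_right (by omega) (by omega)
    have h3 : (d.1 + 1) * m = d.1 * m + m := by ring
    linarith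

theorem Ed_mem (n m : Int) (arr : List (List Int)) {e : Int × Int}
    (he : e ∈ Ed n m arr) :
    ∃ c d, Good n m arr c ∧ Good n m arr d ∧ Adj n m arr c d ∧
      e = (c.1 * m + c.2, d.1 * m + d.2) := by
  obtain ⟨c, hcc, hce⟩ := List.mem_flatMap.mp he
  obtain ⟨hb1, hb2, hb3, hb4⟩ := (mem_cells n m c).1 hcc
  unfold cellEdges at hce
  by_cases h0 : aget arr c.1 c.2 ≠ 0
  swap
  · rw [if_neg h0] at hce
    exact absurd hce (List.not_mem_nil)
  rw [if_pos h0] at hce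
  have hgc : Good n m arr c := ⟨hb1, hb2, hb3, hb4, h0⟩
  rcases List.mem_append.mp hce with hce | hce
  · by_cases h1 : c.2 + 1 < m ∧ aget arr c.1 (c.2 + 1) ≠ 0
    swap
    · rw [if_neg h1] at hce; exact absurd hce (List.not_mem_nil)
    rw [if_pos h1, List.mem_singleton] at hce
    refine ⟨c, (c.1, c.2 + 1), hgc, ⟨hb1, hb2, by omega, h1.1, h1.2⟩, ?_, ?_⟩
    · exact ⟨hgc, ⟨hb1, hb2, by omega, h1.1, h1.2⟩, by simp⟩
    · rw [hce]
      refine Prod.ext_iff.2 ⟨rfl, ?_⟩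
      simp
      ring
  · by_cases h2 : c.1 + 1 < n ∧ aget arr (c.1 + 1) c.2 ≠ 0
    swap
    · rw [if_neg h2] at hce; exact absurd hce (List.not_mem_nil)
    rw [if_pos h2, List.mem_singleton] at hce
    refine ⟨c, (c.1 + 1, c.2), hgc, ⟨by omega, h2.1, hb3, hb4, h2.2⟩, ?_, ?_⟩
    · exact ⟨hgc, ⟨by omega, h2.1, hb3, hb4, h2.2⟩, by simp⟩
    · rw [hce]

theorem Ed_bounds (n m : Int) (arr : List (List Int)) :
    ∀ e ∈ Ed n m arr, InR (n * m) e.1 ∧ InR (n * m) e.2 := by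
  intro e he
  obtain ⟨c, d, hc, hd, _, rfl⟩ := Ed_mem n m arr he
  exact ⟨enc_bounds n m c.1 c.2 hc.1 hc.2.1 hc.2.2.1 hc.2.2.2.1,
    enc_bounds n m d.1 d.2 hd.1 hd.2.1 hd.2.2.1 hd.2.2.2.1⟩

theorem good_right_edge (n m : Int) (arr : List (List Int)) (c : Int × Int)
    (hc : Good n m arr c) (hd : Good n m arr (c.1, c.2 + 1)) :
    (c.1 * m + c.2, c.1 * m + c.2 + 1) ∈ Ed n m arr := by
  refine List.mem_flatMap.mpr ⟨c, (mem_cells n m c).2 ⟨hc.1, hc.2.1, hc.2.2.1, hc.2.2.2.1⟩, ?_⟩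
  unfold cellEdges
  rw [if_pos hc.2.2.2.2]
  refine List.mem_append.mpr (Or.inl ?_)
  rw [if_pos ⟨hd.2.2.2.1, hd.2.2.2.2⟩, List.mem_singleton]

theorem good_down_edge (n m : Int) (arr : List (List Int)) (c : Int × Int)
    (hc : Good n m arr c) (hd : Good n m arr (c.1 + 1, c.2)) :
    (c.1 * m + c.2, (c.1 + 1) * m + c.2) ∈ Ed n m arr := by
  refine List.mem_flatMap.mpr ⟨c, (mem_cells n m c).2 ⟨hc.1, hc.2.1, hc.2.2.1, hc.2.2.2.1⟩, ?_⟩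
  unfold cellEdges
  rw [if_pos hc.2.2.2.2]
  refine List.mem_append.mpr (Or.inr ?_)
  rw [if_pos ⟨hd.2.1, hd.2.2.2.2⟩, List.mem_singleton]

theorem adj_edge (n m : Int) (arr : List (List Int)) {c d : Int × Int}
    (h : Adj n m arr c d) :
    (c.1 * m + c.2, d.1 * m + d.2) ∈ Ed n m arr ∨
    (d.1 * m + d.2, c.1 * m + c.2) ∈ Ed n m arr := by
  obtain ⟨hc, hd, habs⟩ := h
  have hcase : (d.1 = c.1 ∧ d.2 = c.2 + 1) ∨ (d.1 = c.1 ∧ c.2 = d.2 + 1) ∨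
      (d.2 = c.2 ∧ d.1 = c.1 + 1) ∨ (d.2 = c.2 ∧ c.1 = d.1 + 1) := by omega
  rcases hcase with ⟨e1, e2⟩ | ⟨e1, e2⟩ | ⟨e1, e2⟩ | ⟨e1, e2⟩
  · left
    have hd' : Good n m arr (c.1, c.2 + 1) := by
      have : (c.1, c.2 + 1) = d := Prod.ext_iff.2 ⟨by omega, by omega⟩
      rw [this]; exact hd
    have := good_right_edge n m arr c hc hd'
    have heq : d.1 * m + d.2 = c.1 * m + c.2 + 1 := by
      rw [e1, e2]; ring
    rwa [heq]
  · right
    have hc' : Good n m arr (d.1, d.2 + 1) := by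
      have : (d.1, d.2 + 1) = c := Prod.ext_iff.2 ⟨by omega, by omega⟩
      rw [this]; exact hc
    have := good_right_edge n m arr d hd hc'
    have heq : c.1 * m + c.2 = d.1 * m + d.2 + 1 := by
      rw [e1, e2]; ring
    rwa [heq]
  · left
    have hd' : Good n m arr (c.1 + 1, c.2) := by
      have : (c.1 + 1, c.2) = d := Prod.ext_iff.2 ⟨by omega, by omega⟩
      rw [this]; exact hd
    have := good_down_edge n m arr c hc hd'
    have heq : d.1 * m + d.2 = (c.1 + 1) * m + c.2 := by
      rw [e1, e2]
    rwa [heq]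
  · right
    have hc' : Good n m arr (d.1 + 1, d.2) := by
      have : (d.1 + 1, d.2) = c := Prod.ext_iff.2 ⟨by omega, by omega⟩
      rw [this]; exact hc
    have := good_down_edge n m arr d hd hc'
    have heq : c.1 * m + c.2 = (d.1 + 1) * m + d.2 := by
      rw [e1, e2]
    rwa [heq]

theorem eclo_Ed_shape (n m : Int) (arr : List (List Int)) :
    ∀ x y, EClo (Ed n m arr) x y → x = y ∨
      ∃ c d, Good n m arr c ∧ Good n m arr d ∧ x = c.1 * m + c.2 ∧ y = d.1 * m + d.2 ∧
        Reach n m arr c d := by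
  intro x y h
  induction h with
  | rel u v huv =>
    obtain ⟨c, d, hc, hd, hadj, he⟩ := Ed_mem n m arr huv
    obtain ⟨h1, h2⟩ := Prod.mk.injEq .. ▸ he
    exact Or.inr ⟨c, d, hc, hd, h1, h2, Relation.ReflTransGen.single hadj⟩
  | refl => exact Or.inl rfl
  | symm u v _ ih =>
    rcases ih with h | ⟨c, d, hc, hd, h1, h2, hr⟩
    · exact Or.inl h.symm
    · exact Or.inr ⟨d, c, hd, hc, h2, h1, reach_symm n m arr hr⟩
  | trans u v w _ _ ih1 ih2 =>
    rcases ih1 with h1 | ⟨c, d, hc, hd, hx1, hx2, hr1⟩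
    · rcases ih2 with h2 | h2
      · exact Or.inl (h1.trans h2)
      · rw [h1]; exact Or.inr h2
    · rcases ih2 with h2 | ⟨c', d', hc', hd', hy1, hy2, hr2⟩
      · rw [← h2]; exact Or.inr ⟨c, d, hc, hd, hx1, hx2, hr1⟩
      · have hdc' : d = c' := by
          apply enc_inj m d c' ⟨hd.2.2.1, hd.2.2.2.1⟩ ⟨hc'.2.2.1, hc'.2.2.2.1⟩
          omega
        subst hdc'
        exact Or.inr ⟨c, d', hc, hd', hx1, hy2, Relation.ReflTransGen.trans hr1 hr2⟩

theorem eclo_iff_reach (n m : Int) (arr : List (List Int)) {c d : Int × Int}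
    (hc : Good n m arr c) (hd : Good n m arr d) :
    EClo (Ed n m arr) (c.1 * m + c.2) (d.1 * m + d.2) ↔ Reach n m arr c d := by
  constructor
  · intro h
    rcases eclo_Ed_shape n m arr _ _ h with h | ⟨c', d', hc', hd', h1, h2, hr⟩
    · have : c = d := enc_inj m c d ⟨hc.2.2.1, hc.2.2.2.1⟩ ⟨hd.2.2.1, hd.2.2.2.1⟩ h
      rw [this]
      exact Relation.ReflTransGen.refl
    · have e1 : c = c' := enc_inj m c c' ⟨hc.2.2.1, hc.2.2.2.1⟩ ⟨hc'.2.2.1, hc'.2.2.2.1⟩ h1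
      have e2 : d = d' := enc_inj m d d' ⟨hd.2.2.1, hd.2.2.2.1⟩ ⟨hd'.2.2.1, hd'.2.2.2.1⟩ h2
      rw [e1, e2]
      exact hr
  · intro h
    have key : ∀ d', Reach n m arr c d' →
        EClo (Ed n m arr) (c.1 * m + c.2) (d'.1 * m + d'.2) := by
      intro d' h'
      induction h' with
      | refl => exact Relation.EqvGen.refl _
      | tail _ hbd ih =>
        rename_i b d'' _
        have hstep : EClo (Ed n m arr) (b.1 * m + b.2) (d''.1 * m + d''.2) := by
          rcases adj_edge n m arr hbd with hm | hm
          · exact Relation.EqvGen.rel _ _ hm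
          · exact Relation.EqvGen.symm _ _ (Relation.EqvGen.rel _ _ hm)
        exact Relation.EqvGen.trans _ _ _ ih hstep
    exact key d h

-- count of a value over a mapped list, as countP (no named library lemma found)
theorem count_map_eq_countP (l : List (Int × Int)) (f : Int × Int → Int) (b : Int) :
    (l.map f).count b = l.countP (fun a => f a == b) := by
  rw [List.count, List.countP_map]
  rfl


def Pbuild (n m : Int) (arr : List (List Int)) : List Int :=
  (cells n m).foldl (stepU n m arr)
    ((List.range (n * m).toNat).map (fun k : Nat => (k : Int)))

def Cbuild (n m : Int) (arr : List (List Int)) : PySem.Dict Int Int :=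
  (cells n m).foldl (stepC n m arr (Pbuild n m arr)) PySem.Dict.empty

theorem UF_Pbuild (n m : Int) (arr : List (List Int)) :
    UF (n * m) (Pbuild n m arr) (Ed n m arr) := by
  have hb := UF_foldl (n * m) (Ed n m arr)
    ((List.range (n * m).toNat).map (fun k : Nat => (k : Int))) []
    (UF_init (n * m)) (Ed_bounds n m arr)
  unfold Pbuild Ed
  rw [foldl_flatMap (stepU n m arr) (cellEdges n m arr) (fun p e => unionF p e.1 e.2)
    (stepU_eq_cellEdges n m arr)]
  simpa using hb

theorem Cbuild_getD (n m : Int) (arr : List (List Int)) (r : Int) :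
    (Cbuild n m arr).getD r 0 =
      ((((cells n m).filter (fun d => decide (aget arr d.1 d.2 ≠ 0))).map
        (fun d => rootF (Pbuild n m arr) (d.1 * m + d.2))).count r : Int) := by
  unfold Cbuild
  rw [show (stepC n m arr (Pbuild n m arr)) = (fun cn (c : Int × Int) =>
      if aget arr c.1 c.2 ≠ 0 then
        cn.insert (rootF (Pbuild n m arr) (c.1 * m + c.2))
          (cn.getD (rootF (Pbuild n m arr) (c.1 * m + c.2)) 0 + 1)
      else cn) from funext fun _ => funext fun _ => rfl]
  rw [PySem.List.foldl_ite_eq_foldl_filter]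
  have hm : (((cells n m).filter (fun d => decide (aget arr d.1 d.2 ≠ 0))).map
        (fun d => rootF (Pbuild n m arr) (d.1 * m + d.2))).foldl
        (fun cn (r : Int) => cn.insert r (cn.getD r 0 + 1)) PySem.Dict.empty =
      ((cells n m).filter (fun d => decide (aget arr d.1 d.2 ≠ 0))).foldl
        (fun (cn : PySem.Dict Int Int) c => cn.insert (rootF (Pbuild n m arr) (c.1 * m + c.2))
          (cn.getD (rootF (Pbuild n m arr) (c.1 * m + c.2)) 0 + 1)) PySem.Dict.empty :=
    List.foldl_map
  show (((cells n m).filter (fun d => decide (aget arr d.1 d.2 ≠ 0))).foldl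
      (fun (cn : PySem.Dict Int Int) c => cn.insert (rootF (Pbuild n m arr) (c.1 * m + c.2))
        (cn.getD (rootF (Pbuild n m arr) (c.1 * m + c.2)) 0 + 1))
      PySem.Dict.empty).getD r 0 = _
  rw [← hm, PySem.Dict.getD_foldl_insert_add_one]
  simp

theorem count_eq_ncard (n m : Int) (arr : List (List Int)) (P : List Int)
    (hUF : UF (n * m) P (Ed n m arr)) (c : Int × Int) (hc : Good n m arr c) :
    ((((cells n m).filter (fun d => decide (aget arr d.1 d.2 ≠ 0))).map
        (fun d => rootF P (d.1 * m + d.2))).count (rootF P (c.1 * m + c.2)) : Int)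
      = (((RSet n m arr [c]).ncard : Nat) : Int) := by
  obtain ⟨hlen, hM, hiff⟩ := hUF
  have hchar : ∀ d ∈ cells n m,
      ((rootF P (d.1 * m + d.2) == rootF P (c.1 * m + c.2)) &&
        decide (aget arr d.1 d.2 ≠ 0)) = true ↔ Reach n m arr c d := by
    intro d hdc
    obtain ⟨hb1, hb2, hb3, hb4⟩ := (mem_cells n m d).1 hdc
    have hin_c := enc_bounds n m c.1 c.2 hc.1 hc.2.1 hc.2.2.1 hc.2.2.2.1
    constructor
    · rintro hh
      rw [Bool.and_eq_true, beq_iff_eq, decide_eq_true_eq] at hh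
      have hgd : Good n m arr d := ⟨hb1, hb2, hb3, hb4, hh.2⟩
      have hin_d := enc_bounds n m d.1 d.2 hb1 hb2 hb3 hb4
      have := (hiff _ _ hin_d hin_c).1 hh.1
      exact reach_symm n m arr ((eclo_iff_reach n m arr hgd hc).1 this)
    · intro hreach
      have hgd : Good n m arr d := reach_good n m arr hreach hc
      rw [Bool.and_eq_true, beq_iff_eq, decide_eq_true_eq]
      refine ⟨?_, hgd.2.2.2.2⟩
      have hin_d := enc_bounds n m d.1 d.2 hb1 hb2 hb3 hb4
      exact (hiff _ _ hin_d hin_c).2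
        ((eclo_iff_reach n m arr hgd hc).2 (reach_symm n m arr hreach))
  rw [count_map_eq_countP, List.countP_filter, List.countP_eq_length_filter]
  have hset : RSet n m arr [c] = LSet ((cells n m).filter
      (fun d => (rootF P (d.1 * m + d.2) == rootF P (c.1 * m + c.2)) &&
        decide (aget arr d.1 d.2 ≠ 0))) := by
    ext d
    simp only [LSet, Set.mem_setOf_eq, List.mem_filter]
    constructor
    · rintro ⟨y, hy, hrch⟩
      rw [List.mem_singleton] at hy
      subst hy
      have hgd : Good n m arr d := reach_good n m arr hrch hc
      have hdc : d ∈ cells n m :=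
        (mem_cells n m d).2 ⟨hgd.1, hgd.2.1, hgd.2.2.1, hgd.2.2.2.1⟩
      exact ⟨hdc, (hchar d hdc).2 hrch⟩
    · rintro ⟨hdc, hh⟩
      exact ⟨c, List.mem_singleton.mpr rfl, (hchar d hdc).1 hh⟩
  rw [hset, ncard_LSet_of_nodup _ (List.Nodup.filter _ (cells_nodup n m))]

theorem cells_nil (n m : Int) (h : n ≤ 0 ∨ m ≤ 0) : cells n m = [] := by
  rcases h with h | h
  · have hh : PySem.List.pyRange 0 n 1 = [] := by
      refine List.eq_nil_iff_forall_not_mem.2 (fun x hx => ?_)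
      rw [PySem.List.mem_pyRange_one] at hx
      omega
    simp [cells, hh]
  · have hh : PySem.List.pyRange 0 m 1 = [] := by
      refine List.eq_nil_iff_forall_not_mem.2 (fun x hx => ?_)
      rw [PySem.List.mem_pyRange_one] at hx
      omega
    simp [cells, hh]

theorem find_alt_eq (n : Int) (m : Int) (arr : List (List Int)) :
    find_alt n m arr = (cells n m).foldl
      (stepM n m arr (Pbuild n m arr) (Cbuild n m arr)) 0 := by
  by_cases hnm : n ≤ 0 ∨ m ≤ 0
  · rw [cells_nil n m hnm]
    show find_alt n m arr = 0
    unfold find_alt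
    rw [if_pos hnm]
  unfold find_alt
  rw [if_neg hnm]
  have h1 : (PySem.List.pyRange 0 n 1).foldl (fun p i =>
        (PySem.List.pyRange 0 m 1).foldl (fun p j => stepU n m arr p (i, j)) p)
        ((List.range (n * m).toNat).map (fun k : Nat => (k : Int))) =
      Pbuild n m arr :=
    foldl_nested (stepU n m arr) _ _ _
  show (PySem.List.pyRange 0 n 1).foldl (fun b i =>
      (PySem.List.pyRange 0 m 1).foldl (fun b j =>
        stepM n m arr
          ((PySem.List.pyRange 0 n 1).foldl (fun p i =>
            (PySem.List.pyRange 0 m 1).foldl (fun p j => stepU n m arr p (i, j)) p)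
            ((List.range (n * m).toNat).map (fun k : Nat => (k : Int))))
          ((PySem.List.pyRange 0 n 1).foldl (fun cn i =>
            (PySem.List.pyRange 0 m 1).foldl (fun cn j =>
              stepC n m arr
                ((PySem.List.pyRange 0 n 1).foldl (fun p i =>
                  (PySem.List.pyRange 0 m 1).foldl (fun p j => stepU n m arr p (i, j)) p)
                  ((List.range (n * m).toNat).map (fun k : Nat => (k : Int))))
                cn (i, j)) cn) PySem.Dict.empty)
          b (i, j)) b) 0 = _
  rw [h1]
  have h2 : (PySem.List.pyRange 0 n 1).foldl (fun cn i =>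
        (PySem.List.pyRange 0 m 1).foldl (fun cn j =>
          stepC n m arr (Pbuild n m arr) cn (i, j)) cn) PySem.Dict.empty =
      Cbuild n m arr :=
    foldl_nested (stepC n m arr (Pbuild n m arr)) _ _ _
  rw [h2]
  exact foldl_nested (stepM n m arr (Pbuild n m arr) (Cbuild n m arr)) _ _ _

theorem find_alt_eq_specval (n : Int) (m : Int) (arr : List (List Int)) :
    find_alt n m arr = (cells n m).foldl (fun b c =>
      if aget arr c.1 c.2 ≠ 0 then
        max b (((RSet n m arr [c]).ncard : Nat) : Int) else b) 0 := by
  rw [find_alt_eq]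
  apply PySem.List.foldl_congr_mem
  intro b c hcm
  unfold stepM
  by_cases htr : aget arr c.1 c.2 ≠ 0
  · rw [if_pos htr, if_pos htr]
    obtain ⟨hb1, hb2, hb3, hb4⟩ := (mem_cells n m c).1 hcm
    have hgc : Good n m arr c := ⟨hb1, hb2, hb3, hb4, htr⟩
    rw [Cbuild_getD, count_eq_ncard n m arr (Pbuild n m arr) (UF_Pbuild n m arr) c hgc]
  · rw [if_neg htr, if_neg htr]

-- ===== VERDICT (by name: the statement is the Claim_ definition above) =====
theorem find_spec : Claim_equal_find := by
  intro n m arr _hdom _hpre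
  unfold Spec_find
  rw [find_eq_specval, find_alt_eq_specval]
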